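-- pv_equiv track=rewrite | github.com/DesignBites/oep | oep/mapper/layouts.py | get_node_icon_prefix
-- ===== SOURCE A (Python) =====
-- SIMILARITY_CONNECTION_ICONS = {
--     'values': 'a',
--     'working': 'c',
--     'resources': 'd',
-- }
--
-- def get_node_icon_prefix(similarities):
--     letters = []
--     if similarities:
--         similarities = list(set(similarities))
--         for similarity in similarities:
--             letter = SIMILARITY_CONNECTION_ICONS.get(similarity)
--             if letter:
--                 letters.append(letter)
--             else:
--                 letters.append('b')  # custom (user defined) similarity
--         return ''.join(sorted(letters))
--     else:
--         return 'O'
-- ===== SOURCE B (Python) =====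
-- SIMILARITY_CONNECTION_ICONS = {
--     'values': 'a',
--     'working': 'c',
--     'resources': 'd',
-- }
--
--
-- def get_node_icon_prefix(similarities):
--     if not similarities:
--         return 'O'
--     letters = [SIMILARITY_CONNECTION_ICONS.get(s, 'b') for s in set(similarities)]
--     return ''.join(letter * letters.count(letter) for letter in 'abcd')
-- ===== Notes on version B (the rewrite author's own statement) =====
-- stated objective: alternative
-- what changed: B maps the deduplicated similarities to their letters once and then emits each letter of the fixed alphabet 'abcd' repeated by its count, replacing A's per-item append loop plus sorted() with a count-per-letter pass over the fixed output alphabet.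
import Mathlib
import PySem

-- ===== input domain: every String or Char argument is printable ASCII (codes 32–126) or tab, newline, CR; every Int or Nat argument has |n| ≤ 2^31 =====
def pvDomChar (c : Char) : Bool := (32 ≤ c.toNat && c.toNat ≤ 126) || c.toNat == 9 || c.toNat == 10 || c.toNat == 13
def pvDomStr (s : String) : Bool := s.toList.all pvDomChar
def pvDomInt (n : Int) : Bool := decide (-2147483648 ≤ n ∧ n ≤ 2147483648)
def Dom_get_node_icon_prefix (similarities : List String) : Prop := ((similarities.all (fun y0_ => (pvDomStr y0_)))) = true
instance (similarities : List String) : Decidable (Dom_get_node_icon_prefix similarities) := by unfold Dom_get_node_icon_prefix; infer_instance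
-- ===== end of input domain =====

-- B maps the tags to letters once and emits each letter of the fixed alphabet repeated by its count, instead of A's append loop + sorted() (objective: alternative decomposition).

-- ===== PORT A =====
def pvIcons : PySem.Dict String String := PySem.Dict.ofList [("values", "a"), ("working", "c"), ("resources", "d")]

def get_node_icon_prefix (similarities : List String) : String :=
  if similarities ≠ [] then
    -- similarities = list(set(similarities)); consumed order-insensitively (the letters get sorted)
    let sims := PySem.Set.ofList similarities
    let letters := sims.foldl (fun acc similarity =>
      match PySem.Dict.get? pvIcons similarity with
      | some letter => if letter = "" then acc ++ ["b"] else acc ++ [letter]  -- `if letter:` truthiness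
      | none => acc ++ ["b"]) ([] : List String)
    PySem.Str.join "" (PySem.List.sorted letters (fun x => x) false)
  else "O"

-- ===== PORT B =====
def get_node_icon_prefix_alt (similarities : List String) : String :=
  if similarities = [] then "O"
  else
    -- letters = [….get(s, 'b') for s in set(similarities)]; consumed order-insensitively (only counted)
    let letters := (PySem.Set.ofList similarities).map (fun s => PySem.Dict.getD pvIcons s "b")
    -- `letter * n` (string repetition, n ≥ 0) ported by hand as ofList (pyRepeat [c] n) — exact for n ≥ 0
    PySem.Str.join "" (("abcd".toList).map (fun c =>
      String.ofList (PySem.List.pyRepeat [c] ((letters.count (String.ofList [c]) : Int)))))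

-- ===== PRECONDITION & SPEC =====
def Spec_get_node_icon_prefix (similarities : List String) (out : String) : Prop := out = get_node_icon_prefix_alt similarities
instance (similarities : List String) (out : String) : Decidable (Spec_get_node_icon_prefix similarities out) := by unfold Spec_get_node_icon_prefix; infer_instance

-- ===== CLAIM (what is proved, stated in full; the proofs are below) =====
def Claim_equal_get_node_icon_prefix : Prop := ∀ (similarities : List String), Dom_get_node_icon_prefix similarities → Spec_get_node_icon_prefix similarities (get_node_icon_prefix similarities)

-- ===== LEMMAS AND PROOFS =====

-- the letter a similarity maps to (B's `SIMILARITY_CONNECTION_ICONS.get(s, 'b')`)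
def pvCls (s : String) : String := PySem.Dict.getD pvIcons s "b"

theorem get?_pvIcons (s : String) :
    PySem.Dict.get? pvIcons s
      = if s = "values" then some "a" else if s = "working" then some "c" else if s = "resources" then some "d" else none := by
  by_cases h1 : s = "values"
  · subst h1; decide
  by_cases h2 : s = "working"
  · subst h2; decide
  by_cases h3 : s = "resources"
  · subst h3; decide
  have h : pvIcons = PySem.Dict.mk [("values", "a"), ("working", "c"), ("resources", "d")] := by decide
  rw [h, if_neg h1, if_neg h2, if_neg h3]
  simp only [PySem.Dict.get?_mk_cons]
  rw [show ("values" == s) = false by simp; exact fun e => h1 e.symm]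
  rw [show ("working" == s) = false by simp; exact fun e => h2 e.symm]
  rw [show ("resources" == s) = false by simp; exact fun e => h3 e.symm]
  simp [PySem.Dict.get?]

theorem pvCls_eq (s : String) :
    pvCls s = if s = "values" then "a" else if s = "working" then "c" else if s = "resources" then "d" else "b" := by
  simp only [pvCls, PySem.Dict.getD, get?_pvIcons]
  split_ifs <;> rfl

theorem pvCls_mem (s : String) : pvCls s = "a" ∨ pvCls s = "b" ∨ pvCls s = "c" ∨ pvCls s = "d" := by
  rw [pvCls_eq]; split_ifs <;> simp

theorem bodyA_eq (acc : List String) (x : String) :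
    (match PySem.Dict.get? pvIcons x with
     | some letter => if letter = "" then acc ++ ["b"] else acc ++ [letter]
     | none => acc ++ ["b"]) = acc ++ [pvCls x] := by
  rw [pvCls_eq, get?_pvIcons]
  split_ifs <;> simp

theorem foldA_eq (l : List String) (acc : List String) :
    l.foldl (fun acc similarity =>
      match PySem.Dict.get? pvIcons similarity with
      | some letter => if letter = "" then acc ++ ["b"] else acc ++ [letter]
      | none => acc ++ ["b"]) acc = acc ++ l.map pvCls := by
  induction l generalizing acc with
  | nil => simp
  | cons x t ih =>
    simp only [List.foldl_cons, List.map_cons]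
    rw [bodyA_eq, ih, List.append_assoc]
    rfl

theorem pvRepSorted (ca cb cc cd : Nat) :
    List.Pairwise (fun (a b : String) => a ≤ b)
      (List.replicate ca "a" ++ List.replicate cb "b" ++ List.replicate cc "c" ++ List.replicate cd "d") := by
  have lab : ("a" : String) ≤ "b" := le_of_lt (by rw [String.lt_iff_toList_lt]; decide)
  have lac : ("a" : String) ≤ "c" := le_of_lt (by rw [String.lt_iff_toList_lt]; decide)
  have lad : ("a" : String) ≤ "d" := le_of_lt (by rw [String.lt_iff_toList_lt]; decide)
  have lbc : ("b" : String) ≤ "c" := le_of_lt (by rw [String.lt_iff_toList_lt]; decide)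
  have lbd : ("b" : String) ≤ "d" := le_of_lt (by rw [String.lt_iff_toList_lt]; decide)
  have lcd : ("c" : String) ≤ "d" := le_of_lt (by rw [String.lt_iff_toList_lt]; decide)
  refine List.pairwise_append.mpr ⟨List.pairwise_append.mpr ⟨List.pairwise_append.mpr
    ⟨List.pairwise_replicate.mpr (Or.inr le_rfl), List.pairwise_replicate.mpr (Or.inr le_rfl), ?_⟩,
      List.pairwise_replicate.mpr (Or.inr le_rfl), ?_⟩, List.pairwise_replicate.mpr (Or.inr le_rfl), ?_⟩
  · intro a ha b hb
    rw [List.eq_of_mem_replicate ha, List.eq_of_mem_replicate hb]; exact lab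
  · intro a ha b hb
    rw [List.eq_of_mem_replicate hb]
    rcases List.mem_append.mp ha with h | h
    · rw [List.eq_of_mem_replicate h]; exact lac
    · rw [List.eq_of_mem_replicate h]; exact lbc
  · intro a ha b hb
    rw [List.eq_of_mem_replicate hb]
    rcases List.mem_append.mp ha with h | h
    · rcases List.mem_append.mp h with h2 | h2
      · rw [List.eq_of_mem_replicate h2]; exact lad
      · rw [List.eq_of_mem_replicate h2]; exact lbd
    · rw [List.eq_of_mem_replicate h]; exact lcd

theorem sorted_letters_eq (l : List String) :
    PySem.List.sorted (l.map pvCls) (fun x => x) false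
      = List.replicate (l.countP (fun s => pvCls s == "a")) "a"
        ++ List.replicate (l.countP (fun s => pvCls s == "b")) "b"
        ++ List.replicate (l.countP (fun s => pvCls s == "c")) "c"
        ++ List.replicate (l.countP (fun s => pvCls s == "d")) "d" := by
  apply PySem.List.sorted_id_eq_of_perm_of_pairwise
  · -- permutation, by counting every string
    rw [List.perm_iff_count]
    intro x
    simp only [List.count, List.countP_append, List.countP_map, Function.comp_def]
    by_cases ha : x = "a"
    · subst ha; simp [List.countP_replicate]
    by_cases hb : x = "b"
    · subst hb; simp [List.countP_replicate]
    by_cases hc : x = "c"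
    · subst hc; simp [List.countP_replicate]
    by_cases hd : x = "d"
    · subst hd; simp [List.countP_replicate]
    · have h0 : List.countP (fun y => pvCls y == x) l = 0 := by
        apply List.countP_eq_zero.mpr
        intro s _
        simp only [beq_iff_eq]
        rcases pvCls_mem s with h | h | h | h
        · rw [h]; exact fun e => ha e.symm
        · rw [h]; exact fun e => hb e.symm
        · rw [h]; exact fun e => hc e.symm
        · rw [h]; exact fun e => hd e.symm
      have e1 : ("a" == x) = false := by simp; exact fun e => ha e.symm
      have e2 : ("b" == x) = false := by simp; exact fun e => hb e.symm
      have e3 : ("c" == x) = false := by simp; exact fun e => hc e.symm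
      have e4 : ("d" == x) = false := by simp; exact fun e => hd e.symm
      simp [List.countP_replicate, e1, e2, e3, e4, h0]
  · exact pvRepSorted _ _ _ _

-- ''.join([]) over lists of singleton strings: both joins flatten to the same char list
theorem join_nil_flatten (parts : List (List Char)) : PySem.Chars.join [] parts = parts.flatten := by
  induction parts with
  | nil => simp [PySem.Chars.join_nil]
  | cons a t ih =>
    cases t with
    | nil => simp [PySem.Chars.join_singleton]
    | cons b u => simp [PySem.Chars.join_cons_cons, ih]

theorem toList_join_empty (parts : List String) :
    (PySem.Str.join "" parts).toList = (List.map String.toList parts).flatten := by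
  rw [PySem.Str.toList_join]; simp [join_nil_flatten]

-- joining "" over the four replicate blocks of singleton strings equals joining the four repeated strings
theorem join_blocks_eq (ca cb cc cd : Nat) :
    PySem.Str.join "" (List.replicate ca "a" ++ List.replicate cb "b" ++ List.replicate cc "c" ++ List.replicate cd "d")
      = PySem.Str.join "" [String.ofList (List.replicate ca 'a'), String.ofList (List.replicate cb 'b'),
          String.ofList (List.replicate cc 'c'), String.ofList (List.replicate cd 'd')] := by
  apply String.toList_inj.mp
  rw [toList_join_empty, toList_join_empty]
  simp only [List.map_append, List.map_replicate, List.map_cons, List.map_nil,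
    String.toList_ofList, List.flatten_append, List.flatten_cons, List.flatten_nil]
  simp [show ("a":String).toList = ['a'] from rfl, show ("b":String).toList = ['b'] from rfl,
    show ("c":String).toList = ['c'] from rfl, show ("d":String).toList = ['d'] from rfl]

-- ===== VERDICT (by name: the statement is the Claim_ definition above) =====
theorem get_node_icon_prefix_spec : Claim_equal_get_node_icon_prefix := by
  intro similarities _
  unfold Spec_get_node_icon_prefix get_node_icon_prefix get_node_icon_prefix_alt
  by_cases h : similarities = []
  · simp [h]
  · simp only [h, ne_eq, not_false_eq_true, if_true, if_false]
    rw [foldA_eq, List.nil_append, sorted_letters_eq]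
    simp only [show "abcd".toList = ['a','b','c','d'] from rfl, List.map_cons, List.map_nil,
      PySem.List.pyRepeat_singleton, Int.toNat_natCast, List.count, List.countP_map, Function.comp_def]
    exact join_blocks_eq _ _ _ _
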